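-- pv_equiv track=rewrite | github.com/junglecrunch1212/administrate-me-now | adminme/lib/skill_runner/wrapper.py | _max_sensitivity
-- ===== SOURCE A (Python) =====
-- from typing import TYPE_CHECKING, Any
--
-- _SENS_ORDER = {"normal": 0, "sensitive": 1, "privileged": 2}
--
-- def _max_sensitivity(values: Any) -> str:
--     best = "normal"
--     best_rank = 0
--     for v in values:
--         rank = _SENS_ORDER.get(str(v), 0)
--         if rank > best_rank:
--             best = str(v)
--             best_rank = rank
--     return best
-- ===== SOURCE B (Python) =====
-- def _max_sensitivity(values):
--     seen = {str(v) for v in values}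
--     for level in ("privileged", "sensitive"):
--         if level in seen:
--             return level
--     return "normal"
-- ===== Notes on version B (the rewrite author's own statement) =====
-- stated objective: simpler
-- what changed: B builds a set of the stringified values once and then probes the canonical levels in descending priority (privileged, then sensitive), returning the first one present; it keeps no running maximum or rank at all, unlike A's single-pass best/best_rank loop.
import Mathlib
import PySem

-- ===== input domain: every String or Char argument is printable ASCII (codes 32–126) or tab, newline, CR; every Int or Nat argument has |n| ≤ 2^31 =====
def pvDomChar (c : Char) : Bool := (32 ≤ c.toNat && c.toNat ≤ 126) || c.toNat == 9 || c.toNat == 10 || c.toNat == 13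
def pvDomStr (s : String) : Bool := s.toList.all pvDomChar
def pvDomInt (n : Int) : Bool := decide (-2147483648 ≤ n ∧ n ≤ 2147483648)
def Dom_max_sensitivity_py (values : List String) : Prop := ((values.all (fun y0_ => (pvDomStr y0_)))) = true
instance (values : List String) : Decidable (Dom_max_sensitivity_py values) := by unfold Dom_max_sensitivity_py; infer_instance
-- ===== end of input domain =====

-- B builds a set of the values once and probes the canonical levels in descending
-- priority, instead of A's loop tracking the best string and its rank.

-- ===== PORT A =====
-- the Python expression `_SENS_ORDER.get(str(v), 0)` (str(v) = v for string inputs)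
def sensRank (v : String) : Int :=
  if v = "normal" then 0 else if v = "sensitive" then 1 else if v = "privileged" then 2 else 0

def max_sensitivity_py (values : List String) : String :=
  (values.foldl (fun (st : String × Int) v =>
      let rank := sensRank v
      if rank > st.2 then (v, rank) else st) ("normal", 0)).1

-- ===== PORT B =====
def max_sensitivity_py_alt (values : List String) : String :=
  let seen : PySem.Set String := PySem.Set.ofList values
  if seen.contains "privileged" then "privileged"
  else if seen.contains "sensitive" then "sensitive"
  else "normal"

-- ===== PRECONDITION & SPEC =====
def Spec_max_sensitivity_py (values : List String) (out : String) : Prop := out = max_sensitivity_py_alt values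
instance (values : List String) (out : String) : Decidable (Spec_max_sensitivity_py values out) := by unfold Spec_max_sensitivity_py; infer_instance

-- ===== CLAIM (what is proved, stated in full; the proofs are below) =====
def Claim_equal_max_sensitivity_py : Prop := ∀ (values : List String), Dom_max_sensitivity_py values → Spec_max_sensitivity_py values (max_sensitivity_py values)

-- ===== LEMMAS AND PROOFS =====

-- the canonical name of each reachable rank
def revName (m : Int) : String :=
  if m = 2 then "privileged" else if m = 1 then "sensitive" else "normal"

-- A's loop, started at a canonical state, yields the canonical name of the
-- best rank seen so far, giving priority to "privileged", then "sensitive".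
theorem loopA_eq (l : List String) (b : String) (r : Int)
    (hb : b = revName r) (h0 : 0 ≤ r) (h2 : r ≤ 2) :
    (l.foldl (fun (st : String × Int) v =>
        let rank := sensRank v
        if rank > st.2 then (v, rank) else st) (b, r)).1
      = if l.contains "privileged" ∨ r = 2 then "privileged"
        else if l.contains "sensitive" ∨ r = 1 then "sensitive"
        else "normal" := by
  induction l generalizing b r with
  | nil =>
    simp only [List.contains, List.elem_nil, List.foldl_nil, Bool.false_eq_true, false_or]
    subst hb
    unfold revName
    split_ifs <;> simp_all
  | cons v t ih =>
    simp only [List.foldl_cons]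
    by_cases hgt : sensRank v > r
    · have hv : v = "sensitive" ∧ sensRank v = 1 ∨ v = "privileged" ∧ sensRank v = 2 := by
        unfold sensRank at hgt ⊢
        split_ifs at hgt ⊢ with h1 h2 h3 <;> simp_all <;> omega
      rw [if_pos hgt]
      rcases hv with ⟨rfl, hr⟩ | ⟨rfl, hr⟩
      · rw [hr, ih "sensitive" 1 (by decide) (by decide) (by decide)]
        have hr1 : r ≠ 2 := by omega
        simp [hr1]
      · rw [hr, ih "privileged" 2 (by decide) (by decide) (by decide)]
        simp
    · rw [if_neg hgt]
      rw [ih b r hb h0 h2]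
      have hcase : r = 0 ∨ r = 1 ∨ r = 2 := by omega
      rcases hcase with rfl | rfl | rfl
      · have hvp' : ¬ ("privileged" = v) :=
          fun h => hgt (by rw [← h]; decide)
        have hvs' : ¬ ("sensitive" = v) :=
          fun h => hgt (by rw [← h]; decide)
        simp [hvp', hvs']
      · have hvp' : ¬ ("privileged" = v) :=
          fun h => hgt (by rw [← h]; decide)
        simp [hvp']
      · simp

theorem max_sensitivity_py_spec : Claim_equal_max_sensitivity_py := by
  intro values _
  unfold Spec_max_sensitivity_py max_sensitivity_py max_sensitivity_py_alt
  rw [loopA_eq values "normal" 0 (by decide) (by decide) (by decide)]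
  have hp : (PySem.Set.ofList values).contains "privileged" = values.contains "privileged" := by
    simp [PySem.Set.mem_ofList]
  have hs : (PySem.Set.ofList values).contains "sensitive" = values.contains "sensitive" := by
    simp [PySem.Set.mem_ofList]
  simp only [hp, hs]
  split_ifs <;> simp_all
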